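-- pv_equiv track=rewrite | github.com/wenxin-liao/hgamer3d | PyHBind/Components/Marshaller/Marshaller.py | asName
-- ===== SOURCE A (Python) =====
-- def asName(name):
-- 	"""returns a new Haskellish name for a C-function"""
-- 	newName = ""
-- 	toHigher = False
-- 	for char in name:
-- 		if char in "_-":
-- 			toHigher = True
-- 		else:
-- 			if toHigher:
-- 				newName = newName + char.upper()
-- 			else:
-- 				newName = newName + char
-- 			toHigher = False
-- 	return newName
-- ===== SOURCE B (Python) =====
-- def asName(name):
-- 	"""returns a new Haskellish name for a C-function"""
-- 	# tokenize on the separators, then capitalize every token after the first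
-- 	tokens = []
-- 	cur = ""
-- 	for ch in name:
-- 		if ch in "_-":
-- 			tokens.append(cur)
-- 			cur = ""
-- 		else:
-- 			cur += ch
-- 	tokens.append(cur)
-- 	return tokens[0] + "".join(t[0].upper() + t[1:] if t else "" for t in tokens[1:])
-- ===== Notes on version B (the rewrite author's own statement) =====
-- stated objective: idiomatic
-- what changed: Replaces the stateful toHigher flag loop with a tokenize-then-capitalize decomposition: split the name into tokens at the separator characters, keep the first token, uppercase the first character of each later token and join.
import Mathlib
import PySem

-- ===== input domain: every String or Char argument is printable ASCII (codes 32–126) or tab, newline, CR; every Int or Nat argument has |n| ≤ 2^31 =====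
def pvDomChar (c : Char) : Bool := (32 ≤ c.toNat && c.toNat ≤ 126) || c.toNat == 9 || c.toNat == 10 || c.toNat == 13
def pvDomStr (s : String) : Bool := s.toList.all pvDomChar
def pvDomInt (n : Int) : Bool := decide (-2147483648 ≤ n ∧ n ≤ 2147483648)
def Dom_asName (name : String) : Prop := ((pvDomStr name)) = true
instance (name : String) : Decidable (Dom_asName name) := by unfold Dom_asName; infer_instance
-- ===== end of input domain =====

-- B replaces A's stateful toHigher flag loop by tokenize-then-capitalize (idiomatic decomposition; same cost).
-- Both ports carry Python's string concatenation over List Char (exact; Lean's own String append is opaque to the kernel).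

-- ===== PORT A =====
def asName (name : String) : String :=
  -- newName = ""; toHigher = False; for char in name: …
  let st := name.toList.foldl
    (fun (st : List Char × Bool) char =>
      if char = '_' ∨ char = '-' then (st.1, true)
      else (st.1 ++ [if st.2 then PySem.Chars.upperChar char else char], false))
    ([], false)
  String.ofList st.1

-- ===== PORT B =====
-- t[0].upper() + t[1:] if t else ""
def pvCap (t : List Char) : List Char :=
  match t with
  | [] => []
  | c :: r => PySem.Chars.upperChar c :: r

def asName_alt (name : String) : String :=
  -- tokens = []; cur = ""; for ch in name: …; tokens.append(cur)
  let st := name.toList.foldl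
    (fun (st : List (List Char) × List Char) ch =>
      if ch = '_' ∨ ch = '-' then (st.1 ++ [st.2], ([] : List Char))
      else (st.1, st.2 ++ [ch]))
    ([], [])
  let tokens := st.1 ++ [st.2]
  -- tokens[0] + "".join(t[0].upper() + t[1:] if t else "" for t in tokens[1:])
  String.ofList (tokens.headI ++ PySem.Chars.join [] (tokens.tail.map pvCap))

-- ===== PRECONDITION & SPEC =====
def Spec_asName (name : String) (out : String) : Prop := out = asName_alt name
instance (name : String) (out : String) : Decidable (Spec_asName name out) := by unfold Spec_asName; infer_instance

-- ===== CLAIM (what is proved, stated in full; the proofs are below) =====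
def Claim_equal_asName : Prop := ∀ (name : String), Dom_asName name → Spec_asName name (asName name)

-- ===== LEMMAS AND PROOFS =====

-- direct-recursion characterisation of A's loop: `b` is the pending toHigher flag
def pvRun (cs : List Char) (b : Bool) : List Char :=
  match cs with
  | [] => []
  | c :: rest =>
    if c = '_' ∨ c = '-' then pvRun rest true
    else (if b then PySem.Chars.upperChar c else c) :: pvRun rest false

-- direct-recursion characterisation of B's tokenizer (result is always nonempty)
def pvToks (cs : List Char) : List (List Char) :=
  match cs with
  | [] => [[]]
  | c :: rest =>
    if c = '_' ∨ c = '-' then [] :: pvToks rest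
    else (c :: (pvToks rest).headI) :: (pvToks rest).tail

theorem pvToks_ne_nil (cs : List Char) : pvToks cs ≠ [] := by
  cases cs with
  | nil => simp [pvToks]
  | cons c rest => unfold pvToks; split <;> simp

theorem pvFoldA (cs : List Char) (acc : List Char) (b : Bool) :
    (cs.foldl
      (fun (st : List Char × Bool) char =>
        if char = '_' ∨ char = '-' then (st.1, true)
        else (st.1 ++ [if st.2 then PySem.Chars.upperChar char else char], false))
      (acc, b)).1 = acc ++ pvRun cs b := by
  induction cs generalizing acc b with
  | nil => simp [pvRun]
  | cons c rest ih =>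
    simp only [List.foldl_cons, pvRun]
    split
    · rw [ih]
    · rw [ih]; simp

theorem pvFoldB (cs : List Char) (toks : List (List Char)) (cur : List Char) :
    (cs.foldl
      (fun (st : List (List Char) × List Char) ch =>
        if ch = '_' ∨ ch = '-' then (st.1 ++ [st.2], ([] : List Char))
        else (st.1, st.2 ++ [ch]))
      (toks, cur)).1
    ++ [(cs.foldl
      (fun (st : List (List Char) × List Char) ch =>
        if ch = '_' ∨ ch = '-' then (st.1 ++ [st.2], ([] : List Char))
        else (st.1, st.2 ++ [ch]))
      (toks, cur)).2]
    = toks ++ (cur ++ (pvToks cs).headI) :: (pvToks cs).tail := by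
  induction cs generalizing toks cur with
  | nil => simp [pvToks]
  | cons c rest ih =>
    simp only [List.foldl_cons, pvToks]
    split
    · rw [ih]
      rcases List.exists_cons_of_ne_nil (pvToks_ne_nil rest) with ⟨h, t, hh⟩
      simp [hh]
    · rw [ih]
      simp

theorem pvJoinNilCons (x : List Char) (xs : List (List Char)) :
    PySem.Chars.join [] (x :: xs) = x ++ PySem.Chars.join [] xs := by
  cases xs with
  | nil => simp [PySem.Chars.join, List.intercalate]
  | cons y ys => simp [PySem.Chars.join_cons_cons]

theorem pvRunToks (cs : List Char) :
    ((pvToks cs).headI ++ PySem.Chars.join [] ((pvToks cs).tail.map pvCap) = pvRun cs false)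
    ∧ (PySem.Chars.join [] ((pvToks cs).map pvCap) = pvRun cs true) := by
  induction cs with
  | nil =>
    constructor <;> simp [pvToks, pvRun, pvCap, PySem.Chars.join, List.intercalate]
  | cons c rest ih =>
    unfold pvToks pvRun
    split
    · constructor <;>
        simp only [List.headI_cons, List.tail_cons, List.map_cons, pvJoinNilCons, pvCap,
          List.nil_append, ih.2]
    · constructor
      · have := congrArg (fun l => c :: l) ih.1
        simpa using this
      · have := congrArg (fun l => PySem.Chars.upperChar c :: l) ih.1
        simp only [List.map_cons, pvJoinNilCons, pvCap]
        simpa using this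

-- ===== VERDICT (by name: the statement is the Claim_ definition above) =====
theorem asName_spec : Claim_equal_asName := by
  intro name _
  unfold Spec_asName
  simp only [asName, asName_alt]
  rw [pvFoldA, pvFoldB]
  simp only [List.nil_append, List.headI_cons, List.tail_cons]
  rw [(pvRunToks name.toList).1]
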